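-- pv_equiv track=rewrite | github.com/RegisCA/ggltcg | backend/src/simulation/deck_loader.py | _find_similar_card_names
-- ===== SOURCE A (Python) =====
-- from typing import Dict, List, Optional, Tuple
--
-- def _find_similar_card_names(target: str, valid_names: set[str], max_distance: int = 3) -> List[str]:
--     """
--     Find card names similar to the target using simple string matching.
--
--     Args:
--         target: The target string to match
--         valid_names: Set of valid names to search
--         max_distance: Maximum edit distance (not used in simple implementation)
--
--     Returns:
--         List of similar names, sorted by relevance
--     """
--     target_lower = target.lower()
--
--     # Collect matches in priority order
--     exact_matches = []
--     starts_with = []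
--     contains = []
--     similar = []
--
--     for name in valid_names:
--         name_lower = name.lower()
--
--         if name_lower == target_lower:
--             exact_matches.append(name)
--         elif name_lower.startswith(target_lower) or target_lower.startswith(name_lower):
--             starts_with.append(name)
--         elif target_lower in name_lower or name_lower in target_lower:
--             contains.append(name)
--         elif _simple_similarity(target_lower, name_lower) <= max_distance:
--             similar.append(name)
--
--     # Return in priority order
--     return exact_matches + starts_with + contains + similar
--
-- def _simple_similarity(s1: str, s2: str) -> int:
--     """
--     Calculate a simple character difference score between two strings.
--     Lower score = more similar.
--
--     Args:
--         s1: First string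
--         s2: Second string
--
--     Returns:
--         Difference score
--     """
--     # Simple implementation: count character differences
--     max_len = max(len(s1), len(s2))
--     if max_len == 0:
--         return 0
--
--     # Count matching characters at same positions
--     matches = sum(1 for i in range(min(len(s1), len(s2))) if s1[i] == s2[i])
--
--     # Return difference score
--     return max_len - matches
-- ===== SOURCE B (Python) =====
-- def _find_similar_card_names(target: str, valid_names, max_distance: int = 3):
--     target_lower = target.lower()
--
--     def _rank(name: str) -> int:
--         name_lower = name.lower()
--         if name_lower == target_lower:
--             return 0
--         if name_lower.startswith(target_lower) or target_lower.startswith(name_lower):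
--             return 1
--         if target_lower in name_lower or name_lower in target_lower:
--             return 2
--         if _simple_similarity(target_lower, name_lower) <= max_distance:
--             return 3
--         return 4
--
--     return sorted((n for n in valid_names if _rank(n) < 4), key=_rank)
--
--
-- def _simple_similarity(s1: str, s2: str) -> int:
--     max_len = max(len(s1), len(s2))
--     if max_len == 0:
--         return 0
--     matches = sum(1 for i in range(min(len(s1), len(s2))) if s1[i] == s2[i])
--     return max_len - matches
-- ===== Notes on version B (the rewrite author's own statement) =====
-- stated objective: simpler
-- what changed: Replaces the four explicit bucket lists and their concatenation by a single rank helper (0 exact, 1 prefix, 2 substring, 3 similar, 4 no match) with a filter and one stable sort by rank.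
import Mathlib
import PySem

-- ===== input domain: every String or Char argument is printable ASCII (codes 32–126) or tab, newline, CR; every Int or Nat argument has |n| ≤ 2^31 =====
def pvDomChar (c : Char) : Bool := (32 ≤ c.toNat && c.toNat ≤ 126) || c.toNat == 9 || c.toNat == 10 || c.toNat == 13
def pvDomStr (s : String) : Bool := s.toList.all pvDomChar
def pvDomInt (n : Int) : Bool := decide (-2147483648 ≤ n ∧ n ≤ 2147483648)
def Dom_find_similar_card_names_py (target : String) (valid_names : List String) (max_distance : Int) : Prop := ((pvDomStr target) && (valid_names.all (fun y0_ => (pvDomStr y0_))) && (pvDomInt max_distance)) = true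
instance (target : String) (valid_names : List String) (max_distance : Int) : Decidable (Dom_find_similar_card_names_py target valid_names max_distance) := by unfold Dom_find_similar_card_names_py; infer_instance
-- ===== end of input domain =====

-- B replaces A's four bucket lists by a rank helper plus filter and one stable sort by rank (objective: simpler).


-- shared helper: _simple_similarity, identical in both Pythons
def simple_similarity (s1 s2 : String) : Int :=
  let max_len : Int := max (PySem.Str.len s1) (PySem.Str.len s2)
  if max_len = 0 then 0
  else
    let m : Int :=
      ((PySem.List.pyRange 0 (min (PySem.Str.len s1) (PySem.Str.len s2)) 1).filter
        (fun i => PySem.Str.pyGet? s1 i == PySem.Str.pyGet? s2 i)).length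
    max_len - m

-- ===== PORT A =====
def find_similar_card_names_py (target : String) (valid_names : List String) (max_distance : Int) : List String :=
  let target_lower := PySem.Str.lower target
  let st := valid_names.foldl
    (fun (st : List String × List String × List String × List String) name =>
      let (exact_matches, starts_with, contains, similar) := st
      let name_lower := PySem.Str.lower name
      if name_lower == target_lower then
        (exact_matches ++ [name], starts_with, contains, similar)
      else if PySem.Str.startswith name_lower target_lower || PySem.Str.startswith target_lower name_lower then
        (exact_matches, starts_with ++ [name], contains, similar)
      else if PySem.Str.isIn target_lower name_lower || PySem.Str.isIn name_lower target_lower then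
        (exact_matches, starts_with, contains ++ [name], similar)
      else if simple_similarity target_lower name_lower ≤ max_distance then
        (exact_matches, starts_with, contains, similar ++ [name])
      else
        (exact_matches, starts_with, contains, similar))
    ([], [], [], [])
  st.1 ++ st.2.1 ++ st.2.2.1 ++ st.2.2.2

-- ===== PORT B =====
-- B's helper _rank
def rank_name (target_lower : String) (max_distance : Int) (name : String) : Int :=
  let name_lower := PySem.Str.lower name
  if name_lower == target_lower then 0
  else if PySem.Str.startswith name_lower target_lower || PySem.Str.startswith target_lower name_lower then 1
  else if PySem.Str.isIn target_lower name_lower || PySem.Str.isIn name_lower target_lower then 2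
  else if simple_similarity target_lower name_lower ≤ max_distance then 3
  else 4

def find_similar_card_names_py_alt (target : String) (valid_names : List String) (max_distance : Int) : List String :=
  let target_lower := PySem.Str.lower target
  PySem.List.sorted
    (valid_names.filter (fun n => rank_name target_lower max_distance n < 4))
    (rank_name target_lower max_distance) false

-- ===== PRECONDITION & SPEC =====
def Spec_find_similar_card_names_py (target : String) (valid_names : List String) (max_distance : Int) (out : List String) : Prop := out = find_similar_card_names_py_alt target valid_names max_distance
instance (target : String) (valid_names : List String) (max_distance : Int) (out : List String) : Decidable (Spec_find_similar_card_names_py target valid_names max_distance out) := by unfold Spec_find_similar_card_names_py; infer_instance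

-- ===== CLAIM (what is proved, stated in full; the proofs are below) =====
def Claim_equal_find_similar_card_names_py : Prop := ∀ (target : String) (valid_names : List String) (max_distance : Int), Dom_find_similar_card_names_py target valid_names max_distance → Spec_find_similar_card_names_py target valid_names max_distance (find_similar_card_names_py target valid_names max_distance)

-- ===== LEMMAS AND PROOFS =====

theorem rank_name_def (target_lower : String) (max_distance : Int) (name : String) :
    rank_name target_lower max_distance name =
      (if PySem.Str.lower name == target_lower then 0
       else if PySem.Str.startswith (PySem.Str.lower name) target_lower || PySem.Str.startswith target_lower (PySem.Str.lower name) then 1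
       else if PySem.Str.isIn target_lower (PySem.Str.lower name) || PySem.Str.isIn (PySem.Str.lower name) target_lower then 2
       else if simple_similarity target_lower (PySem.Str.lower name) ≤ max_distance then 3
       else 4) := rfl

theorem insertBy_append_of_not_before {α : Type} (before : α → α → Bool) (x : α)
    (l1 l2 : List α) (h : ∀ y ∈ l1, before x y = false) :
    PySem.List.insertBy before x (l1 ++ l2) = l1 ++ PySem.List.insertBy before x l2 := by
  induction l1 with
  | nil => simp
  | cons y t ih =>
    have hy : before x y = false := h y (by simp)
    simp [PySem.List.insertBy, hy, ih (fun z hz => h z (by simp [hz]))]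

theorem insertBy_all_before {α : Type} (before : α → α → Bool) (x : α)
    (l : List α) (h : ∀ y ∈ l, before x y = true) :
    PySem.List.insertBy before x l = x :: l := by
  cases l with
  | nil => simp [PySem.List.insertBy]
  | cons y t => simp [PySem.List.insertBy, h y (by simp)]

-- a stable sort by an Int key taking values in {0,1,2,3} is bucket concatenation
theorem sorted_four {α : Type} (key : α → Int) (xs : List α)
    (h : ∀ x ∈ xs, 0 ≤ key x ∧ key x ≤ 3) :
    PySem.List.sorted xs key false =
      xs.filter (fun x => key x == 0) ++ xs.filter (fun x => key x == 1) ++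
      xs.filter (fun x => key x == 2) ++ xs.filter (fun x => key x == 3) := by
  induction xs using List.reverseRecOn with
  | nil => simp [PySem.List.sorted]
  | append_singleton t a ih =>
    have ht : ∀ x ∈ t, 0 ≤ key x ∧ key x ≤ 3 := fun x hx => h x (by simp [hx])
    have ha : 0 ≤ key a ∧ key a ≤ 3 := h a (by simp)
    have hstep : PySem.List.sorted (t ++ [a]) key false =
        PySem.List.insertBy (fun p q => decide (key p < key q)) a (PySem.List.sorted t key false) := by
      simp [PySem.List.sorted, List.foldl_append]
    rw [hstep, ih ht]
    have memf : ∀ (i : Int) (x : α), x ∈ t.filter (fun y => key y == i) → key x = i := by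
      intro i x hx
      have := List.of_mem_filter hx
      simpa using this
    have hk : key a = 0 ∨ key a = 1 ∨ key a = 2 ∨ key a = 3 := by omega
    set f0 := t.filter (fun y => key y == 0) with hf0
    set f1 := t.filter (fun y => key y == 1) with hf1
    set f2 := t.filter (fun y => key y == 2) with hf2
    set f3 := t.filter (fun y => key y == 3) with hf3
    rcases hk with hk | hk | hk | hk
    · rw [show f0 ++ f1 ++ f2 ++ f3 = f0 ++ (f1 ++ f2 ++ f3) by simp,
          insertBy_append_of_not_before _ _ f0 (f1 ++ f2 ++ f3)
            (by intro y hy; have := memf 0 y (hf0 ▸ hy); simp; omega),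
          insertBy_all_before _ _ _ (by
            intro y hy
            simp only [List.mem_append] at hy
            rcases hy with (hy | hy) | hy
            · have := memf 1 y (hf1 ▸ hy); simp; omega
            · have := memf 2 y (hf2 ▸ hy); simp; omega
            · have := memf 3 y (hf3 ▸ hy); simp; omega)]
      simp [List.filter_append, hk, hf0, hf1, hf2, hf3]
    · rw [show f0 ++ f1 ++ f2 ++ f3 = (f0 ++ f1) ++ (f2 ++ f3) by simp,
          insertBy_append_of_not_before _ _ (f0 ++ f1) (f2 ++ f3)
            (by intro y hy
                simp only [List.mem_append] at hy
                rcases hy with hy | hy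
                · have := memf 0 y (hf0 ▸ hy); simp; omega
                · have := memf 1 y (hf1 ▸ hy); simp; omega),
          insertBy_all_before _ _ _ (by
            intro y hy
            simp only [List.mem_append] at hy
            rcases hy with hy | hy
            · have := memf 2 y (hf2 ▸ hy); simp; omega
            · have := memf 3 y (hf3 ▸ hy); simp; omega)]
      simp [List.filter_append, hk, hf0, hf1, hf2, hf3]
    · rw [show f0 ++ f1 ++ f2 ++ f3 = (f0 ++ f1 ++ f2) ++ f3 by simp,
          insertBy_append_of_not_before _ _ (f0 ++ f1 ++ f2) f3
            (by intro y hy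
                simp only [List.mem_append] at hy
                rcases hy with (hy | hy) | hy
                · have := memf 0 y (hf0 ▸ hy); simp; omega
                · have := memf 1 y (hf1 ▸ hy); simp; omega
                · have := memf 2 y (hf2 ▸ hy); simp; omega),
          insertBy_all_before _ _ _ (by
            intro y hy; have := memf 3 y (hf3 ▸ hy); simp; omega)]
      simp [List.filter_append, hk, hf0, hf1, hf2, hf3]
    · rw [PySem.List.insertBy_of_forall_not_before _ _ _
            (by intro y hy
                simp only [List.mem_append] at hy
                rcases hy with ((hy | hy) | hy) | hy
                · have := memf 0 y (hf0 ▸ hy); simp; omega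
                · have := memf 1 y (hf1 ▸ hy); simp; omega
                · have := memf 2 y (hf2 ▸ hy); simp; omega
                · have := memf 3 y (hf3 ▸ hy); simp; omega)]
      simp [List.filter_append, hk, hf0, hf1, hf2, hf3]

-- A's fold, with a generalized accumulator, is the four rank buckets
theorem foldl_buckets (target_lower : String) (max_distance : Int) (xs : List String)
    (ex sw co si : List String) :
    xs.foldl
      (fun (st : List String × List String × List String × List String) name =>
        let (exact_matches, starts_with, contains, similar) := st
        let name_lower := PySem.Str.lower name
        if name_lower == target_lower then
          (exact_matches ++ [name], starts_with, contains, similar)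
        else if PySem.Str.startswith name_lower target_lower || PySem.Str.startswith target_lower name_lower then
          (exact_matches, starts_with ++ [name], contains, similar)
        else if PySem.Str.isIn target_lower name_lower || PySem.Str.isIn name_lower target_lower then
          (exact_matches, starts_with, contains ++ [name], similar)
        else if simple_similarity target_lower name_lower ≤ max_distance then
          (exact_matches, starts_with, contains, similar ++ [name])
        else
          (exact_matches, starts_with, contains, similar))
      (ex, sw, co, si) =
    (ex ++ xs.filter (fun n => rank_name target_lower max_distance n == 0),
     sw ++ xs.filter (fun n => rank_name target_lower max_distance n == 1),
     co ++ xs.filter (fun n => rank_name target_lower max_distance n == 2),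
     si ++ xs.filter (fun n => rank_name target_lower max_distance n == 3)) := by
  induction xs generalizing ex sw co si with
  | nil => simp
  | cons n t ih =>
    simp only [List.foldl_cons]
    by_cases h0 : (PySem.Str.lower n == target_lower) = true
    · have hr : rank_name target_lower max_distance n = 0 := by
        rw [rank_name_def, if_pos h0]
      simp only [h0, if_true]
      rw [ih]
      simp [List.filter_cons, hr]
    · simp only [h0, Bool.false_eq_true, if_false]
      by_cases h1 : (PySem.Str.startswith (PySem.Str.lower n) target_lower || PySem.Str.startswith target_lower (PySem.Str.lower n)) = true
      · have hr : rank_name target_lower max_distance n = 1 := by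
          rw [rank_name_def, if_neg (by simp_all), if_pos h1]
        simp only [h1, if_true]
        rw [ih]
        simp [List.filter_cons, hr]
      · simp only [h1, Bool.false_eq_true, if_false]
        by_cases h2 : (PySem.Str.isIn target_lower (PySem.Str.lower n) || PySem.Str.isIn (PySem.Str.lower n) target_lower) = true
        · have hr : rank_name target_lower max_distance n = 2 := by
            rw [rank_name_def, if_neg (by simp_all), if_neg (by simp_all), if_pos h2]
          simp only [h2, if_true]
          rw [ih]
          simp [List.filter_cons, hr]
        · simp only [h2, Bool.false_eq_true, if_false]
          by_cases h3 : simple_similarity target_lower (PySem.Str.lower n) ≤ max_distance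
          · have hr : rank_name target_lower max_distance n = 3 := by
              rw [rank_name_def, if_neg (by simp_all), if_neg (by simp_all), if_neg (by simp_all), if_pos h3]
            simp only [h3, if_true]
            rw [ih]
            simp [List.filter_cons, hr]
          · have hr : rank_name target_lower max_distance n = 4 := by
              rw [rank_name_def, if_neg (by simp_all), if_neg (by simp_all), if_neg (by simp_all), if_neg h3]
            simp only [h3, if_false]
            rw [ih]
            simp [List.filter_cons, hr]

theorem rank_name_cases (target_lower : String) (max_distance : Int) (n : String) :
    rank_name target_lower max_distance n = 0 ∨ rank_name target_lower max_distance n = 1 ∨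
    rank_name target_lower max_distance n = 2 ∨ rank_name target_lower max_distance n = 3 ∨
    rank_name target_lower max_distance n = 4 := by
  rw [rank_name_def]
  split_ifs <;> simp

theorem find_similar_card_names_py_spec' (target : String) (valid_names : List String) (max_distance : Int) :
    find_similar_card_names_py target valid_names max_distance =
    find_similar_card_names_py_alt target valid_names max_distance := by
  simp only [find_similar_card_names_py, find_similar_card_names_py_alt]
  rw [foldl_buckets (PySem.Str.lower target) max_distance valid_names [] [] [] []]
  rw [sorted_four (rank_name (PySem.Str.lower target) max_distance)
      (valid_names.filter (fun n => rank_name (PySem.Str.lower target) max_distance n < 4))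
      (by intro x hx
          have hx4 : rank_name (PySem.Str.lower target) max_distance x < 4 := by
            have := List.of_mem_filter hx
            simpa using this
          rcases rank_name_cases (PySem.Str.lower target) max_distance x with h | h | h | h | h <;> omega)]
  have hff : ∀ (i : Int), i < 4 →
      (valid_names.filter (fun n => decide (rank_name (PySem.Str.lower target) max_distance n < 4))).filter
        (fun n => rank_name (PySem.Str.lower target) max_distance n == i) =
      valid_names.filter (fun n => rank_name (PySem.Str.lower target) max_distance n == i) := by
    intro i hi
    rw [List.filter_filter]
    apply List.filter_congr
    intro x _
    by_cases h : rank_name (PySem.Str.lower target) max_distance x = i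
    · simp [h, hi]
    · simp [h]
  rw [hff 0 (by norm_num), hff 1 (by norm_num), hff 2 (by norm_num), hff 3 (by norm_num)]
  simp

-- ===== VERDICT (by name: the statement is the Claim_ definition above) =====
theorem find_similar_card_names_py_spec : Claim_equal_find_similar_card_names_py := by
  intro target valid_names max_distance _
  unfold Spec_find_similar_card_names_py
  exact find_similar_card_names_py_spec' target valid_names max_distance
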